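-- pv_equiv track=rewrite | github.com/4d6174686973/circuit-design | src/extension.py | nearest_neighbor_topology
-- ===== SOURCE A (Python) =====
-- def nearest_neighbor_topology(w: int, h: int):
--     """ Generates a nearest-neighbor topology for a 2D grid of qubits.
--     Remarks:
--         It should at least work for the 3x3 BAS grid.
--     Args:
--         w (int): The width of the grid.
--         h (int): The height of the grid.
--     Returns:
--         list: A list of qubit pairs representing the connections between qubits.
--     """
--     connections = []
--     for i in range(w*h):
--         if i%w != w-1:
--             connections.append((i, i+1))
--         if i//w != h-1:
--             connections.append((i, i+w))
--     connections = sorted(list(set([tuple(sorted(c)) for c in connections])))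
--     return connections
-- ===== SOURCE B (Python) =====
-- def nearest_neighbor_topology(w: int, h: int):
--     """Generate the horizontal and the vertical edges as two separate sorted
--     streams (closed-form: verticals are exactly (i, i+w) for i < w*(h-1)),
--     then two-pointer-merge the streams; the merge of two disjoint sorted
--     streams is sorted and unique, so no set() or sorted() pass is needed.
--     A grid with no positive dimension has no qubits, hence no connections."""
--     if w <= 0 or h <= 0:
--         return []
--     horiz = [(i, i + 1) for i in range(w * h) if i % w != w - 1]
--     vert = [(i, i + w) for i in range(w * (h - 1))]
--     out = []
--     a = b = 0
--     while a < len(horiz) and b < len(vert):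
--         if horiz[a] < vert[b]:
--             out.append(horiz[a])
--             a += 1
--         else:
--             out.append(vert[b])
--             b += 1
--     out.extend(horiz[a:])
--     out.extend(vert[b:])
--     return out
-- ===== Notes on version B (the rewrite author's own statement) =====
-- stated objective: faster
-- what changed: B builds the horizontal and vertical edges as two separate closed-form sorted streams (verticals are exactly (i,i+w) for i < w*(h-1)) and two-pointer-merges them; the merge of the two disjoint sorted streams is sorted and duplicate-free, eliminating A's per-pair sort, set() deduplication and final O(n log n) sort.
-- intended difference: For w < 0 and h < 0 (range(w*h) nonempty), A returns spurious edges between negative qubit indices, e.g. A(-1,-1) = [(-1,0),(0,1)]; B returns [], the intended answer since a grid with negative dimensions has no qubits. — e.g. on nearest_neighbor_topology(-1, -1): A returns [[-1, 0], [0, 1]], B returns []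
import Mathlib
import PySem

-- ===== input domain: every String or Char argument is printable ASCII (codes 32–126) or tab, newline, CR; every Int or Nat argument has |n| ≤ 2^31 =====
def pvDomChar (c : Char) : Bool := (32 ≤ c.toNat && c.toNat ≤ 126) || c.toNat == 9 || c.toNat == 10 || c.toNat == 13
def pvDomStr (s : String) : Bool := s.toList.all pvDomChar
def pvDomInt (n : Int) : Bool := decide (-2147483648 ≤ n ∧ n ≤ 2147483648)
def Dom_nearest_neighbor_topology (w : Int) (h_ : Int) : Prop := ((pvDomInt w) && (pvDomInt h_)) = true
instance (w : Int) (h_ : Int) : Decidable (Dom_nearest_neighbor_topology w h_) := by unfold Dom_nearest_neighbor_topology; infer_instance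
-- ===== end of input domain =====

-- B builds the horizontal and vertical edges as two closed-form sorted streams and two-pointer-merges
-- them, so A's set() and sorted() passes disappear; on negative dimensions B returns [] (see D_ below).

-- ===== PORT A =====
def nearest_neighbor_topology (w : Int) (h_ : Int) : List (List Int) :=
  let connections : List (List Int) :=
    (PySem.List.pyRange 0 (w * h_) 1).foldl (fun acc i =>
      let acc := if PySem.Int.mod i w ≠ w - 1 then acc ++ [[i, i + 1]] else acc
      if PySem.Int.floordiv i w ≠ h_ - 1 then acc ++ [[i, i + w]] else acc) []
  PySem.List.sorted
    (PySem.Set.ofList (connections.map (fun c => PySem.List.sorted c (fun x => x) false)))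
    (fun x => x) false

-- ===== PORT B =====
-- the `while a < len(horiz) and b < len(vert)` two-pointer loop, then `out.extend(horiz[a:]); out.extend(vert[b:])`
def nntMergeLoop (horiz vert : List (List Int)) (a b : Nat) (out : List (List Int)) : List (List Int) :=
  if h : a < horiz.length ∧ b < vert.length then
    if horiz[a]'h.1 < vert[b]'h.2 then
      nntMergeLoop horiz vert (a + 1) b (out ++ [horiz[a]'h.1])
    else
      nntMergeLoop horiz vert a (b + 1) (out ++ [vert[b]'h.2])
  else
    out ++ PySem.List.slice horiz (some (a : Int)) none ++ PySem.List.slice vert (some (b : Int)) none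
termination_by (horiz.length - a) + (vert.length - b)
decreasing_by · omega
              · omega

def nearest_neighbor_topology_alt (w : Int) (h_ : Int) : List (List Int) :=
  if w ≤ 0 ∨ h_ ≤ 0 then [] else
  let horiz := (PySem.List.pyRange 0 (w * h_) 1).foldl (fun acc i =>
    if PySem.Int.mod i w ≠ w - 1 then acc ++ [[i, i + 1]] else acc) []
  let vert := (PySem.List.pyRange 0 (w * (h_ - 1)) 1).foldl (fun acc i => acc ++ [[i, i + w]]) []
  nntMergeLoop horiz vert 0 0 []

-- ===== PRECONDITION & SPEC =====
-- On w < 0 and h < 0 A returns a list of spurious edges between negative "qubit" indices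
-- (range(w*h) is nonempty there); B returns [], the intended answer for a grid with no qubits.
def D_nearest_neighbor_topology (w : Int) (h_ : Int) : Prop := w < 0 ∧ h_ < 0
instance (w : Int) (h_ : Int) : Decidable (D_nearest_neighbor_topology w h_) := by unfold D_nearest_neighbor_topology; infer_instance
def Spec_nearest_neighbor_topology (w : Int) (h_ : Int) (out : List (List Int)) : Prop := ¬ D_nearest_neighbor_topology w h_ → out = nearest_neighbor_topology_alt w h_
instance (w : Int) (h_ : Int) (out : List (List Int)) : Decidable (Spec_nearest_neighbor_topology w h_ out) := by unfold Spec_nearest_neighbor_topology; infer_instance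
def pvDiffWitness_nearest_neighbor_topology : Int × Int := (-1, -1)
def pvDiffWitnessOut_nearest_neighbor_topology : (List (List Int)) × (List (List Int)) := ([[-1, 0], [0, 1]], [])

-- ===== CLAIM (what is proved, stated in full; the proofs are below) =====
def Claim_unchanged_nearest_neighbor_topology : Prop := ∀ (w : Int) (h_ : Int), Dom_nearest_neighbor_topology w h_ → Spec_nearest_neighbor_topology w h_ (nearest_neighbor_topology w h_)
def Claim_changed_nearest_neighbor_topology : Prop := Dom_nearest_neighbor_topology (pvDiffWitness_nearest_neighbor_topology.1) (pvDiffWitness_nearest_neighbor_topology.2) ∧ D_nearest_neighbor_topology (pvDiffWitness_nearest_neighbor_topology.1) (pvDiffWitness_nearest_neighbor_topology.2) ∧ nearest_neighbor_topology (pvDiffWitness_nearest_neighbor_topology.1) (pvDiffWitness_nearest_neighbor_topology.2) = pvDiffWitnessOut_nearest_neighbor_topology.1 ∧ nearest_neighbor_topology_alt (pvDiffWitness_nearest_neighbor_topology.1) (pvDiffWitness_nearest_neighbor_topology.2) = pvDiffWitnessOut_nearest_neighbor_topology.2 ∧ pvDiffWitnessOut_nearest_neighbor_topology.1 ≠ 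pvDiffWitnessOut_nearest_neighbor_topology.2
def Claim_exact_nearest_neighbor_topology : Prop := ∀ (w : Int) (h_ : Int), Dom_nearest_neighbor_topology w h_ → D_nearest_neighbor_topology w h_ → nearest_neighbor_topology w h_ ≠ nearest_neighbor_topology_alt w h_

-- ===== LEMMAS AND PROOFS =====

-- A's per-node block (the two conditional appends of the loop body)
def nntA1 (w h_ i : Int) : List (List Int) :=
  (if PySem.Int.mod i w ≠ w - 1 then [[i, i+1]] else []) ++ (if PySem.Int.floordiv i w ≠ h_ - 1 then [[i, i+w]] else [])

-- structural two-list merge (proof-side reformulation of the two-pointer loop)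
def nntMrg : List (List Int) → List (List Int) → List (List Int)
  | [], ys => ys
  | x :: xs, [] => x :: xs
  | x :: xs, y :: ys => if x < y then x :: nntMrg xs (y :: ys) else y :: nntMrg (x :: xs) ys
termination_by xs ys => xs.length + ys.length

lemma A_connections_eq (w h_ : Int) (acc0 : List (List Int)) :
    ((PySem.List.pyRange 0 (w * h_) 1).foldl (fun acc i =>
      let acc := if PySem.Int.mod i w ≠ w - 1 then acc ++ [[i, i + 1]] else acc
      if PySem.Int.floordiv i w ≠ h_ - 1 then acc ++ [[i, i + w]] else acc) acc0)
      = acc0 ++ (PySem.List.pyRange 0 (w * h_) 1).flatMap (nntA1 w h_) := by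
  rw [PySem.List.foldl_congr_mem (g := fun acc i => acc ++ nntA1 w h_ i)]
  · rw [PySem.List.foldl_append_eq_flatMap]
  · intro acc i _
    simp only [nntA1]
    split_ifs <;> simp

lemma mergeLoop_eq (horiz vert : List (List Int)) (a b : Nat) (out : List (List Int)) :
    nntMergeLoop horiz vert a b out = out ++ nntMrg (horiz.drop a) (vert.drop b) := by
  induction a, b, out using nntMergeLoop.induct (horiz := horiz) (vert := vert) with
  | case1 a b out h hlt ih =>
    rw [nntMergeLoop, dif_pos h, if_pos hlt, ih]
    rw [List.drop_eq_getElem_cons h.1, List.drop_eq_getElem_cons h.2, nntMrg, if_pos hlt,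
        ← List.drop_eq_getElem_cons h.2]
    simp
  | case2 a b out h hlt ih =>
    rw [nntMergeLoop, dif_pos h, if_neg hlt, ih]
    rw [List.drop_eq_getElem_cons h.1, List.drop_eq_getElem_cons h.2, nntMrg, if_neg hlt,
        ← List.drop_eq_getElem_cons h.1]
    simp
  | case3 a b out h =>
    rw [nntMergeLoop, dif_neg h]
    rw [PySem.List.slice_from_natCast, PySem.List.slice_from_natCast]
    rcases Nat.lt_or_ge a horiz.length with ha | ha
    · have hb : vert.length ≤ b := by omega
      rw [List.drop_eq_getElem_cons ha, List.drop_of_length_le hb, nntMrg]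
      rw [← List.drop_eq_getElem_cons ha]
      simp
    · rw [List.drop_of_length_le ha, nntMrg]
      simp

lemma flatMap_singleton_map {α β : Type} (l : List α) (f : α → β) :
    l.flatMap (fun x => [f x]) = l.map f := by
  induction l with
  | nil => rfl
  | cons a l ih => simp [ih]

lemma nntMrg_perm (xs ys : List (List Int)) : (nntMrg xs ys).Perm (xs ++ ys) := by
  induction xs, ys using nntMrg.induct with
  | case1 ys => simp [nntMrg]
  | case2 x xs => simp [nntMrg]
  | case3 x xs y ys hlt ih =>
    rw [nntMrg, if_pos hlt]
    exact (ih.cons x)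
  | case4 x xs y ys hlt ih =>
    rw [nntMrg, if_neg hlt]
    refine (ih.cons y).trans ?_
    refine (List.perm_middle).symm.trans ?_
    simp

lemma mem_nntMrg {z : List Int} {xs ys : List (List Int)} (h : z ∈ nntMrg xs ys) : z ∈ xs ∨ z ∈ ys := by
  have := (nntMrg_perm xs ys).mem_iff.mp h
  simpa using this

lemma nntMrg_pairwise (xs ys : List (List Int)) (hx : xs.Pairwise (· < ·)) (hy : ys.Pairwise (· < ·))
    (hd : ∀ x ∈ xs, ∀ y ∈ ys, x ≠ y) : (nntMrg xs ys).Pairwise (· < ·) := by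
  induction xs, ys using nntMrg.induct with
  | case1 ys => simpa [nntMrg] using hy
  | case2 x xs => simpa [nntMrg] using hx
  | case3 x xs y ys hlt ih =>
    rw [nntMrg, if_pos hlt]
    rw [List.pairwise_cons] at hx ⊢
    refine ⟨?_, ih hx.2 hy (fun a ha => hd a (List.mem_cons_of_mem x ha))⟩
    intro z hz
    rcases mem_nntMrg hz with hz | hz
    · exact hx.1 z hz
    · rcases List.mem_cons.mp hz with rfl | hz
      · exact hlt
      · exact lt_trans hlt ((List.pairwise_cons.mp hy).1 z hz)
  | case4 x xs y ys hlt ih =>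
    rw [nntMrg, if_neg hlt]
    have hyx : y < x := lt_of_le_of_ne (not_lt.mp hlt) (fun h => (hd x (List.mem_cons_self) y (List.mem_cons_self) h.symm))
    rw [List.pairwise_cons] at hy ⊢
    refine ⟨?_, ih hx hy.2 (fun a ha b hb => hd a ha b (List.mem_cons_of_mem y hb))⟩
    intro z hz
    rcases mem_nntMrg hz with hz | hz
    · rcases List.mem_cons.mp hz with rfl | hz
      · exact hyx
      · exact lt_trans hyx ((List.pairwise_cons.mp hx).1 z hz)
    · exact hy.1 z hz

-- the two streams in closed form
def nntHL (w h_ : Int) : List (List Int) :=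
  ((PySem.List.pyRange 0 (w * h_) 1).filter (fun i => decide (PySem.Int.mod i w ≠ w - 1))).map (fun i => [i, i + 1])
def nntVL (w h_ : Int) : List (List Int) :=
  (PySem.List.pyRange 0 (w * (h_ - 1)) 1).map (fun i => [i, i + w])

lemma horiz_eq (w h_ : Int) :
    ((PySem.List.pyRange 0 (w * h_) 1).foldl (fun acc i =>
      if PySem.Int.mod i w ≠ w - 1 then acc ++ [[i, i + 1]] else acc) [])
      = nntHL w h_ := by
  rw [PySem.List.foldl_append_ite]
  simp [nntHL]

lemma vert_eq (w h_ : Int) :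
    ((PySem.List.pyRange 0 (w * (h_ - 1)) 1).foldl (fun acc i => acc ++ [[i, i + w]]) [])
      = nntVL w h_ := by
  rw [PySem.List.foldl_append_eq_flatMap, List.nil_append]
  exact flatMap_singleton_map _ _

lemma mem_nntHL {w h_ : Int} {c : List Int} (hc : c ∈ nntHL w h_) :
    ∃ i, c = [i, i + 1] ∧ PySem.Int.mod i w ≠ w - 1 ∧ 0 ≤ i ∧ i < w * h_ := by
  simp only [nntHL, List.mem_map, List.mem_filter, PySem.List.mem_pyRange_one] at hc
  obtain ⟨i, ⟨⟨h0, h1⟩, h2⟩, rfl⟩ := hc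
  exact ⟨i, rfl, by simpa using h2, h0, h1⟩

lemma mem_nntVL {w h_ : Int} {c : List Int} (hc : c ∈ nntVL w h_) :
    ∃ i, c = [i, i + w] ∧ 0 ≤ i ∧ i < w * (h_ - 1) := by
  simp only [nntVL, List.mem_map, PySem.List.mem_pyRange_one] at hc
  obtain ⟨i, ⟨h0, h1⟩, rfl⟩ := hc
  exact ⟨i, rfl, h0, h1⟩

lemma mod_one_self (i : Int) : PySem.Int.mod i 1 = 0 := by
  rw [PySem.Int.mod_eq_emod_of_pos (by norm_num)]
  simp

lemma nntHL_pairwise (w h_ : Int) : (nntHL w h_).Pairwise (· < ·) := by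
  unfold nntHL
  rw [List.pairwise_map]
  refine ((PySem.List.pairwise_lt_pyRange_one 0 (w * h_)).filter _).imp ?_
  intro a b hab
  exact List.Lex.rel hab

lemma nntVL_pairwise (w h_ : Int) : (nntVL w h_).Pairwise (· < ·) := by
  unfold nntVL
  rw [List.pairwise_map]
  refine (PySem.List.pairwise_lt_pyRange_one 0 (w * (h_ - 1))).imp ?_
  intro a b hab
  exact List.Lex.rel hab

lemma nntHL_VL_disjoint (w h_ : Int) : ∀ x ∈ nntHL w h_, ∀ y ∈ nntVL w h_, x ≠ y := by
  intro x hx y hy hxy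
  obtain ⟨i, rfl, hmod, _, _⟩ := mem_nntHL hx
  obtain ⟨j, rfl, _, _⟩ := mem_nntVL hy
  have h1 : i = j ∧ i + 1 = j + w := by simpa using hxy
  have hw1 : w = 1 := by omega
  rw [hw1] at hmod
  exact hmod (by simpa using mod_one_self i)

lemma flatMap_append_perm {α β : Type} (l : List α) (f g : α → List β) :
    (l.flatMap (fun x => f x ++ g x)).Perm (l.flatMap f ++ l.flatMap g) := by
  induction l with
  | nil => simp
  | cons a l ih =>
    simp only [List.flatMap_cons, List.append_assoc]
    refine (ih.append_left _).append_left (f a) |>.trans ?_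
    refine List.Perm.append_left (f a) ?_
    rw [← List.append_assoc, ← List.append_assoc]
    exact (List.perm_append_comm).append_right _

lemma flatMap_if_singleton {α β : Type} (l : List α) (p : α → Prop) [DecidablePred p] (f : α → β) :
    l.flatMap (fun x => if p x then [f x] else []) = (l.filter (fun x => decide (p x))).map f := by
  induction l with
  | nil => simp
  | cons a l ih =>
    by_cases h : p a <;> simp [h, ih]

lemma floordiv_eq_last_row {w h_ i : Int} (hw : 0 < w) (h1 : w * (h_ - 1) ≤ i) (h2 : i < w * h_) :
    PySem.Int.floordiv i w = h_ - 1 := by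
  rw [PySem.Int.floordiv_eq_iff_of_pos hw]
  constructor
  · nlinarith
  · nlinarith

lemma floordiv_ne_last_row {w h_ i : Int} (hw : 0 < w) (h0 : 0 ≤ i) (h2 : i < w * (h_ - 1)) :
    PySem.Int.floordiv i w ≠ h_ - 1 := by
  intro h
  rw [PySem.Int.floordiv_eq_iff_of_pos hw] at h
  nlinarith [h.1]

lemma raw_perm (w h_ : Int) (hw : 0 < w) (hh : 0 < h_) :
    ((PySem.List.pyRange 0 (w * h_) 1).flatMap (nntA1 w h_)).Perm (nntHL w h_ ++ nntVL w h_) := by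
  unfold nntA1
  refine (flatMap_append_perm _ _ _).trans ?_
  have hH : (PySem.List.pyRange 0 (w * h_) 1).flatMap
      (fun i => if PySem.Int.mod i w ≠ w - 1 then [[i, i+1]] else []) = nntHL w h_ := by
    rw [flatMap_if_singleton]; rfl
  have hV : (PySem.List.pyRange 0 (w * h_) 1).flatMap
      (fun i => if PySem.Int.floordiv i w ≠ h_ - 1 then [[i, i+w]] else []) = nntVL w h_ := by
    rw [PySem.List.pyRange_one_append 0 (w * (h_ - 1)) (w * h_) (by nlinarith) (by nlinarith)]
    rw [List.flatMap_append]
    have e1 : (PySem.List.pyRange 0 (w * (h_ - 1)) 1).flatMap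
        (fun i => if PySem.Int.floordiv i w ≠ h_ - 1 then [[i, i+w]] else []) = nntVL w h_ := by
      unfold nntVL
      rw [← flatMap_singleton_map (PySem.List.pyRange 0 (w * (h_ - 1)) 1) (fun i => [i, i+w])]
      apply List.flatMap_congr
      intro i hi
      rw [PySem.List.mem_pyRange_one] at hi
      rw [if_pos (floordiv_ne_last_row hw hi.1 hi.2)]
    have e2 : (PySem.List.pyRange (w * (h_ - 1)) (w * h_) 1).flatMap
        (fun i => if PySem.Int.floordiv i w ≠ h_ - 1 then [[i, i+w]] else []) = [] := by
      rw [List.flatMap_eq_nil_iff]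
      intro i hi
      rw [PySem.List.mem_pyRange_one] at hi
      rw [if_neg (by simpa using floordiv_eq_last_row hw hi.1 hi.2)]
    rw [e1, e2, List.append_nil]
  rw [hH, hV]

lemma sorted_instIrrel {α κ : Type} [LT κ] (i1 i2 : (a b : κ) → Decidable (a < b)) (xs : List α) (key : α → κ) :
    @PySem.List.sorted α κ _ i1 xs key false = @PySem.List.sorted α κ _ i2 xs key false := by
  have h : i1 = i2 := Subsingleton.elim _ _
  rw [h]

lemma mem_raw {w h_ : Int} (hw : 0 < w) {c : List Int}
    (hc : c ∈ (PySem.List.pyRange 0 (w * h_) 1).flatMap (nntA1 w h_)) : ∃ i j, i < j ∧ c = [i, j] := by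
  rw [List.mem_flatMap] at hc
  obtain ⟨i, _, hc⟩ := hc
  simp only [nntA1, List.mem_append] at hc
  rcases hc with hc | hc <;> split_ifs at hc <;> simp at hc <;> subst hc
  · exact ⟨i, i + 1, by omega, rfl⟩
  · exact ⟨i, i + w, by omega, rfl⟩

lemma alt_empty (w h_ : Int) (h : w ≤ 0 ∨ h_ ≤ 0) : nearest_neighbor_topology_alt w h_ = [] := by
  unfold nearest_neighbor_topology_alt
  rw [if_pos h]

lemma A_empty (w h_ : Int) (h : w * h_ ≤ 0) : nearest_neighbor_topology w h_ = [] := by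
  unfold nearest_neighbor_topology
  rw [PySem.List.pyRange_one_eq_nil h]
  rfl

lemma alt_pos (w h_ : Int) (hw : 0 < w) (hh : 0 < h_) :
    nearest_neighbor_topology_alt w h_ = nntMrg (nntHL w h_) (nntVL w h_) := by
  unfold nearest_neighbor_topology_alt
  rw [if_neg (by omega)]
  simp only [horiz_eq, vert_eq]
  rw [mergeLoop_eq]
  simp

lemma A_eq_sorted_raw (w h_ : Int) :
    nearest_neighbor_topology w h_
      = PySem.List.sorted
          (PySem.Set.ofList (((PySem.List.pyRange 0 (w * h_) 1).flatMap (nntA1 w h_)).map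
            (fun c => PySem.List.sorted c (fun x => x) false))) (fun x => x) false := by
  unfold nearest_neighbor_topology
  rw [A_connections_eq, List.nil_append]

theorem main (w h_ : Int) (hnd : ¬(w < 0 ∧ h_ < 0)) :
    nearest_neighbor_topology w h_ = nearest_neighbor_topology_alt w h_ := by
  by_cases hw : 0 < w
  · by_cases hh : 0 < h_
    · obtain ⟨raw, hraw⟩ : ∃ raw, (PySem.List.pyRange 0 (w * h_) 1).flatMap (nntA1 w h_) = raw :=
        ⟨_, rfl⟩
      have hmrgP : (nntMrg (nntHL w h_) (nntVL w h_)).Pairwise (· < ·) :=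
        nntMrg_pairwise _ _ (nntHL_pairwise w h_) (nntVL_pairwise w h_) (nntHL_VL_disjoint w h_)
      have hperm : (nntMrg (nntHL w h_) (nntVL w h_)).Perm raw :=
        (nntMrg_perm _ _).trans (hraw ▸ (raw_perm w h_ hw hh).symm)
      have hmapself : raw.map (fun c => PySem.List.sorted c (fun x => x) false) = raw := by
        rw [show raw.map (fun c => PySem.List.sorted c (fun x => x) false) = raw.map id from ?_, List.map_id]
        apply List.map_congr_left
        intro c hc
        obtain ⟨i, j, hij, rfl⟩ := mem_raw hw (hraw ▸ hc)
        exact (sorted_instIrrel _ _ _ _).trans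
          (PySem.List.sorted_eq_self_of_pairwise _ _ (by simp [List.pairwise_cons]; omega))
      have hnodup : raw.Nodup := hperm.nodup_iff.mp (hmrgP.imp (fun h => ne_of_lt h))
      rw [A_eq_sorted_raw, hraw, hmapself,
          PySem.Set.ofList_eq_self_of_nodup _ hnodup, alt_pos w h_ hw hh]
      exact (sorted_instIrrel _ _ _ _).trans
        (PySem.List.sorted_eq_of_perm_of_pairwise_lt _ _ _ hperm hmrgP)
    · rw [A_empty w h_ (by nlinarith), alt_empty w h_ (by omega)]
  · have hw' : w ≤ 0 := by omega
    have hprod : w * h_ ≤ 0 := by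
      by_cases h : 0 ≤ h_
      · nlinarith
      · have hz : w = 0 := by omega
        simp [hz]
    rw [A_empty w h_ hprod, alt_empty w h_ (Or.inl hw')]

theorem tight (w h_ : Int) (hw : w < 0) (hh : h_ < 0) :
    nearest_neighbor_topology w h_ ≠ nearest_neighbor_topology_alt w h_ := by
  rw [alt_empty w h_ (by omega)]
  have h1 : 1 ≤ w * h_ := by nlinarith
  have h0 : (0:Int) ∈ PySem.List.pyRange 0 (w*h_) 1 := by
    rw [PySem.List.mem_pyRange_one]; omega
  have hmod : PySem.Int.mod 0 w = 0 := by simp [PySem.Int.mod]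
  have hblk : ([0,1] : List Int) ∈ nntA1 w h_ 0 := by
    simp only [nntA1, hmod, List.mem_append]
    left
    rw [if_pos (by omega)]
    simp
  have hraw : ([0,1] : List Int) ∈ (PySem.List.pyRange 0 (w*h_) 1).flatMap (nntA1 w h_) :=
    List.mem_flatMap.mpr ⟨0, h0, hblk⟩
  have hsp : PySem.List.sorted ([0,1] : List Int) (fun x => x) false = [0,1] :=
    (sorted_instIrrel _ _ _ _).trans (PySem.List.sorted_eq_self_of_pairwise _ _ (by simp [List.pairwise_cons]))
  have hmem : ([0,1] : List Int) ∈ nearest_neighbor_topology w h_ := by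
    unfold nearest_neighbor_topology
    rw [A_connections_eq]
    rw [PySem.List.mem_sorted]
    rw [PySem.Set.mem_ofList]
    simp only [List.nil_append]
    exact List.mem_map.mpr ⟨[0,1], hraw, hsp⟩
  intro hA
  rw [hA] at hmem
  simp at hmem

-- ===== VERDICT (by name: the statement is the Claim_ definition above) =====
theorem nearest_neighbor_topology_spec : Claim_unchanged_nearest_neighbor_topology := by
  intro w h_ _ hnd
  exact main w h_ hnd

theorem nearest_neighbor_topology_changed : Claim_changed_nearest_neighbor_topology := by
  unfold Claim_changed_nearest_neighbor_topology; decide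

theorem nearest_neighbor_topology_tight : Claim_exact_nearest_neighbor_topology := by
  intro w h_ _ hD
  exact tight w h_ hD.1 hD.2
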